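-- pv_equiv track=rewrite | github.com/theman8631/Kernos | kernos/kernel/compaction.py | _strip_follow_ups
-- ===== SOURCE A (Python) =====
-- def _strip_follow_ups(doc: str) -> str:
--     """Remove the FOLLOW_UPS section from the document."""
--     lines = doc.rstrip().split("\n")
--     cleaned = []
--     in_commitments = False
--     for line in lines:
--         stripped = line.strip()
--         if stripped.upper().startswith("FOLLOW_UPS:"):
--             in_commitments = True
--             continue
--         if in_commitments:
--             if stripped.startswith(("-", "type:", "description:", "due:", "context:")) or not stripped:
--                 continue
--             else:
--                 in_commitments = False
--         if not in_commitments: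
--             cleaned.append(line)
--     return "\n".join(cleaned)
-- ===== SOURCE B (Python) =====
-- _ITEM_PREFIXES = ("-", "type:", "description:", "due:", "context:")
--
--
-- def _is_item(stripped: str) -> bool:
--     return stripped.startswith(_ITEM_PREFIXES) or not stripped
--
--
-- def _in_follow_ups(lines, i) -> bool:
--     """Line i lies in a FOLLOW_UPS section iff walking backwards over
--     consecutive item/blank lines reaches a FOLLOW_UPS header."""
--     j = i - 1
--     while j >= 0:
--         s = lines[j].strip()
--         if s.upper().startswith("FOLLOW_UPS:"):
--             return True
--         if not _is_item(s):
--             return False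
--         j -= 1
--     return False
--
--
-- def _strip_follow_ups(doc: str) -> str:
--     """Remove the FOLLOW_UPS section from the document."""
--     lines = doc.rstrip().split("\n")
--     kept = []
--     for i, line in enumerate(lines):
--         s = line.strip()
--         if s.upper().startswith("FOLLOW_UPS:"):
--             continue
--         if _is_item(s) and _in_follow_ups(lines, i):
--             continue
--         kept.append(line)
--     return "\n".join(kept)
-- ===== Notes on version B (the rewrite author's own statement) =====
-- stated objective: alternative
-- what changed: Replaces A's forward stateful scan with an in_commitments flag by a stateless per-line membership test: each line is kept unless it is a header or an item/blank line whose backward walk over consecutive item/blank lines reaches a FOLLOW_UPS header.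
import Mathlib
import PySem

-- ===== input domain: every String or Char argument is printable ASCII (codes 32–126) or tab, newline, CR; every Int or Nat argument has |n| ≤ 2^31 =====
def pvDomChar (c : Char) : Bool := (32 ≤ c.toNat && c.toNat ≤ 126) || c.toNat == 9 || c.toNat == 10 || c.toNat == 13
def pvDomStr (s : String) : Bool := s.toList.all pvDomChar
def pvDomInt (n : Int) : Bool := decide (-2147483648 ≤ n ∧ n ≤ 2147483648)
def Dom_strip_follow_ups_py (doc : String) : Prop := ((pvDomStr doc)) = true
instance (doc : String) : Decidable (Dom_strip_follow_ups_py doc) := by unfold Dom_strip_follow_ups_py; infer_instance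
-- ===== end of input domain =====

-- B replaces A's forward scan with carried flag state by a stateless per-line predicate
-- (keep a line unless a backward walk over item/blank lines hits a FOLLOW_UPS header);
-- objective: alternative algorithm, same result.
-- ===== PORT A =====
-- A's loop body: state is (cleaned, in_commitments); branches in A's order.
def pvA_step (st : List String × Bool) (line : String) : List String × Bool :=
  let stripped := PySem.Str.strip line
  if PySem.Str.startswith (PySem.Str.upper stripped) "FOLLOW_UPS:" then
    (st.1, true)
  else if st.2 then
    if PySem.Str.startswith stripped "-" || PySem.Str.startswith stripped "type:" ||
       PySem.Str.startswith stripped "description:" || PySem.Str.startswith stripped "due:" ||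
       PySem.Str.startswith stripped "context:" || stripped == "" then
      (st.1, true)
    else
      (st.1 ++ [line], false)   -- in_commitments := False, then the final 'if' appends
  else
    (st.1 ++ [line], false)

def strip_follow_ups_py (doc : String) : String :=
  -- sep "\n" is a nonempty literal, so split? is always some
  let lines := (PySem.Str.split? (PySem.Str.rstrip doc) "\n").getD []
  PySem.Str.join "\n" (lines.foldl pvA_step ([], false)).1

-- ===== PORT B =====
def pvB_item (stripped : String) : Bool :=
  PySem.Str.startswith stripped "-" || PySem.Str.startswith stripped "type:" ||
  PySem.Str.startswith stripped "description:" || PySem.Str.startswith stripped "due:" ||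
  PySem.Str.startswith stripped "context:" || stripped == ""

def pvB_header (line : String) : Bool :=
  PySem.Str.startswith (PySem.Str.upper (PySem.Str.strip line)) "FOLLOW_UPS:"

-- B's _in_follow_ups: the backward walk from line i over lines[i-1], lines[i-2], …;
-- the argument is the prefix of lines before i, in reverse order.
def pvB_inFollowUps : List String → Bool
  | [] => false
  | l :: earlier =>
    if pvB_header l then true
    else if pvB_item (PySem.Str.strip l) then pvB_inFollowUps earlier
    else false

-- B's main loop over (i, line); rev is the already-seen prefix reversed (= lines before i).
def pvB_filter (rev : List String) : List String → List String
  | [] => []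
  | line :: rest =>
    if pvB_header line then pvB_filter (line :: rev) rest
    else if pvB_item (PySem.Str.strip line) && pvB_inFollowUps rev then
      pvB_filter (line :: rev) rest
    else line :: pvB_filter (line :: rev) rest

def strip_follow_ups_py_alt (doc : String) : String :=
  PySem.Str.join "\n" (pvB_filter [] ((PySem.Str.split? (PySem.Str.rstrip doc) "\n").getD []))

-- ===== PRECONDITION & SPEC =====
def Spec_strip_follow_ups_py (doc : String) (out : String) : Prop := out = strip_follow_ups_py_alt doc
instance (doc : String) (out : String) : Decidable (Spec_strip_follow_ups_py doc out) := by unfold Spec_strip_follow_ups_py; infer_instance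

-- ===== CLAIM (what is proved, stated in full; the proofs are below) =====
def Claim_equal_strip_follow_ups_py : Prop := ∀ (doc : String), Dom_strip_follow_ups_py doc → Spec_strip_follow_ups_py doc (strip_follow_ups_py doc)

-- ===== LEMMAS AND PROOFS =====

-- characterisation of A's loop body in terms of B's predicates
theorem pvA_step_eq (acc : List String) (b : Bool) (line : String) :
    pvA_step (acc, b) line =
      if pvB_header line then (acc, true)
      else if b && pvB_item (PySem.Str.strip line) then (acc, true)
      else (acc ++ [line], false) := by
  cases b <;> simp only [pvA_step, pvB_item, pvB_header] <;> split_ifs <;> simp_all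

-- main invariant: A's flag at position i equals B's backward-walk predicate on the
-- reversed prefix of lines before i
theorem pv_inv (rest : List String) : ∀ (rev acc : List String),
    (rest.foldl pvA_step (acc, pvB_inFollowUps rev)).1 = acc ++ pvB_filter rev rest := by
  induction rest with
  | nil => intro rev acc; simp [pvB_filter]
  | cons line rest ih =>
    intro rev acc
    rw [List.foldl_cons, pvA_step_eq, pvB_filter]
    by_cases hh : pvB_header line = true
    · rw [if_pos hh, if_pos hh]
      have : (true : Bool) = pvB_inFollowUps (line :: rev) := by
        simp [pvB_inFollowUps, hh]
      rw [this, ih]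
    · have hh' : pvB_header line = false := Bool.eq_false_iff.mpr hh
      rw [if_neg hh, if_neg hh]
      by_cases hi : pvB_item (PySem.Str.strip line) = true
      · by_cases hb : pvB_inFollowUps rev = true
        · rw [hb, hi]
          simp only [Bool.and_self, if_true]
          have : (true : Bool) = pvB_inFollowUps (line :: rev) := by
            simp [pvB_inFollowUps, hh', hi, hb]
          rw [this, ih]
        · have hb' : pvB_inFollowUps rev = false := Bool.eq_false_iff.mpr hb
          rw [hb', hi]
          simp only [Bool.and_false, Bool.false_and, if_neg Bool.false_ne_true]
          have : (false : Bool) = pvB_inFollowUps (line :: rev) := by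
            simp [pvB_inFollowUps, hh', hi, hb']
          rw [this, ih]
          simp
      · have hi' : pvB_item (PySem.Str.strip line) = false := Bool.eq_false_iff.mpr hi
        rw [hi']
        simp only [Bool.and_false, Bool.false_and, if_neg Bool.false_ne_true]
        have : (false : Bool) = pvB_inFollowUps (line :: rev) := by
          simp [pvB_inFollowUps, hh', hi']
        rw [this, ih]
        simp

-- ===== VERDICT (by name: the statement is the Claim_ definition above) =====
theorem strip_follow_ups_py_spec : Claim_equal_strip_follow_ups_py := by
  intro doc _
  unfold Spec_strip_follow_ups_py strip_follow_ups_py strip_follow_ups_py_alt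
  simp only []
  have h := pv_inv ((PySem.Str.split? (PySem.Str.rstrip doc) "\n").getD []) [] []
  simpa [pvB_inFollowUps] using congrArg (PySem.Str.join "\n") h
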